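-- pv_equiv track=rewrite | github.com/AustralianSynchrotron/saxs-web | saxs-app-analysis/saxs_app_analysis/views.py | get_topnav_highlight
-- ===== SOURCE A (Python) =====
-- def get_topnav():
--     topnav = [{ 'title':    'Data Analysis',
--                 'id':       'analysis',
--                 'url':      '',
--                 'sub_menu': [{ 'title': 'Average Subtracted Images',
--                                'id':    'analysis_avg_sub_images',
--                                'url':   '/analysis/avg_sub_images'},
--                             ]
--               }]
--
--     return topnav
--
-- def get_topnav_highlight(view_id):
--     topnav_highlight = {}
--     menus = get_topnav()
--     for menu in menus:
--         for sub_menu in menu['sub_menu']: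
--             if sub_menu['id'] == view_id:
--                 topnav_highlight['app_title']  = menu['title']
--                 topnav_highlight['app_id']     = menu['id']
--                 topnav_highlight['view_title'] = sub_menu['title']
--                 topnav_highlight['view_id']    = sub_menu['id']
--
--     return topnav_highlight
-- ===== SOURCE B (Python) =====
-- def get_topnav():
--     topnav = [{ 'title':    'Data Analysis',
--                 'id':       'analysis',
--                 'url':      '',
--                 'sub_menu': [{ 'title': 'Average Subtracted Images',
--                                'id':    'analysis_avg_sub_images',
--                                'url':   '/analysis/avg_sub_images'},
--                             ]
--               }]
--
--     return topnav
--
-- def get_topnav_highlight(view_id):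
--     # Build a flat index from sub-menu id to its highlight dict, then look up.
--     table = {}
--     for menu in get_topnav():
--         for sub_menu in menu['sub_menu']:
--             table[sub_menu['id']] = {'app_title':  menu['title'],
--                                      'app_id':     menu['id'],
--                                      'view_title': sub_menu['title'],
--                                      'view_id':    sub_menu['id']}
--     return table.get(view_id, {})
-- ===== Notes on version B (the rewrite author's own statement) =====
-- stated objective: idiomatic
-- what changed: B replaces A's scan-and-mutate over the nested menus (conditionally assigning four keys into the result dict) with building a flat sub_menu-id -> highlight-dict index in one pass and returning table.get(view_id, {}).
import Mathlib
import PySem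

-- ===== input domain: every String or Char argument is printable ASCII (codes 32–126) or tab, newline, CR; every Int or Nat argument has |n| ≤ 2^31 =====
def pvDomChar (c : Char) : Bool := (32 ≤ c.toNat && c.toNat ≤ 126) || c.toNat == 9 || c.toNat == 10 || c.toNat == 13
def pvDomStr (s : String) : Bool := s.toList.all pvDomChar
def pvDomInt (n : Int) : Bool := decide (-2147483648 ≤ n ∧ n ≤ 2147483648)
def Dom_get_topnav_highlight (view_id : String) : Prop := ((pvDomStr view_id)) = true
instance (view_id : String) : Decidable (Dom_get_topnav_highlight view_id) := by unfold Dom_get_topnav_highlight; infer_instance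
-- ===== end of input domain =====

-- B builds a flat id→highlight index once and looks view_id up (idiomatic data-structure restructuring); return value only.


-- ===== PORT A =====
-- menu = (title, id, url, sub_menu); sub_menu entry = (title, id, url)
def get_topnav : List (String × String × String × List (String × String × String)) :=
  [("Data Analysis", "analysis", "",
    [("Average Subtracted Images", "analysis_avg_sub_images", "/analysis/avg_sub_images")])]

def get_topnav_highlight (view_id : String) : List (String × String) :=
  let topnav_highlight : PySem.Dict String String := PySem.Dict.empty
  let menus := get_topnav
  (menus.foldl (fun hl menu =>
    menu.2.2.2.foldl (fun hl sub_menu =>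
      if sub_menu.2.1 == view_id then
        ((((hl.insert "app_title" menu.1).insert "app_id" menu.2.1).insert "view_title" sub_menu.1).insert "view_id" sub_menu.2.1)
      else hl) hl) topnav_highlight).items

-- ===== PORT B =====
def get_topnav_highlight_alt (view_id : String) : List (String × String) :=
  let table : PySem.Dict String (PySem.Dict String String) :=
    get_topnav.foldl (fun t menu =>
      menu.2.2.2.foldl (fun t sub_menu =>
        t.insert sub_menu.2.1
          (PySem.Dict.ofList [("app_title", menu.1), ("app_id", menu.2.1),
                              ("view_title", sub_menu.1), ("view_id", sub_menu.2.1)])) t)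
      PySem.Dict.empty
  (table.getD view_id PySem.Dict.empty).items

-- ===== PRECONDITION & SPEC =====
def Spec_get_topnav_highlight (view_id : String) (out : List (String × String)) : Prop := out = get_topnav_highlight_alt view_id
instance (view_id : String) (out : List (String × String)) : Decidable (Spec_get_topnav_highlight view_id out) := by unfold Spec_get_topnav_highlight; infer_instance

-- ===== CLAIM (what is proved, stated in full; the proofs are below) =====
def Claim_equal_get_topnav_highlight : Prop := ∀ (view_id : String), Dom_get_topnav_highlight view_id → Spec_get_topnav_highlight view_id (get_topnav_highlight view_id)

-- ===== LEMMAS AND PROOFS =====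

-- ===== VERDICT (by name: the statement is the Claim_ definition above) =====
theorem get_topnav_highlight_spec : Claim_equal_get_topnav_highlight := by
  intro v _
  unfold Spec_get_topnav_highlight
  by_cases h : v = "analysis_avg_sub_images"
  · subst h; decide
  · simp [get_topnav_highlight, get_topnav_highlight_alt, get_topnav, List.foldl,
      PySem.Dict.getD, PySem.Dict.get?, PySem.Dict.empty, PySem.Dict.insert,
      PySem.Dict.contains, List.find?, Ne.symm h]
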